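-- pv_equiv track=rewrite | github.com/SonOfLilit/kleenexp | ke/numrange.py | number_range_to_regex
-- ===== SOURCE A (Python) =====
-- def replace_with(a, i, digit):
--     s = str(a)
--     above = s[: -i - 1]
--     below = s[-i:] if i > 0 else ""
--     return int(above + str(digit) + below)
--
-- def digit_at(x, i):
--     return int(str(x)[-i - 1])
--
-- def try_to_replace_lowest_nonzero_digit(a, b, index):
--     # otherwise when a > 0 and b == 0, _try_replace will return falsy 0 to mean "use this" :(
--     assert a <= b
--     digit = min(9, digit_at(b, 0)) if index == 0 else max(1, digit_at(b, index) - 1)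
--     return _try_replace(a, b, index, 9) or _try_replace(a, b, index, digit) or a
--
-- def _try_replace(a, b, index, digit):
--     replaced = replace_with(a, index, digit)
--     if replaced <= b:
--         return replaced
--     return None
--
-- def sequence_of_nines_instead_of_zeros(a):
--     replaced = a
--     nine = 9
--     while a % 10 == 0:
--         replaced += nine
--         yield replaced
--         a //= 10
--         nine *= 10
--
-- def replace_all_zero_digits_staying_smaller_than_b(a, b):
--     if a == 0:
--         return 0, a
--
--     i = 0
--     for replaced in sequence_of_nines_instead_of_zeros(a):
--         if replaced <= b:
--             a = replaced
--             i += 1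
--         else:
--             break
--     return i, a
--
-- def max_single_range_below(a, b):
--     assert a <= b
--     index, a = replace_all_zero_digits_staying_smaller_than_b(a, b)
--     return try_to_replace_lowest_nonzero_digit(a, b, index)
--
-- def single_range_to_regex(a, b):
--     if a == b:
--         return str(a)
--
--     below = ""
--     while a // 10 != b // 10:
--         a //= 10
--         b //= 10
--         below += r"\d"
--
--     digit_a = a % 10
--     digit_b = b % 10
--     if digit_a == digit_b:
--         character_class = digit_a
--     elif digit_a == 0 and digit_b == 9:
--         character_class = r"\d"
--     else:
--         character_class = f"[{digit_a}-{digit_b}]"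
--
--     if a // 10:
--         above = str(a // 10)
--     else:
--         above = ""
--
--     return f"{above}{character_class}{below}"
--
-- def number_range_to_regex(a, b):
--     assert a <= b
--     assert a >= 0 and b >= 0
--
--     if a == b:
--         return str(a)
--     max_a = max_single_range_below(a, b)
--     if max_a == b:
--         return single_range_to_regex(a, b)
--     return "|".join(
--         [
--             single_range_to_regex(a, max_a),
--             number_range_to_regex(max_a + 1, b),
--         ]
--     )
-- ===== SOURCE B (Python) =====
-- def replace_with(a, i, digit):
--     s = str(a)
--     above = s[: -i - 1]
--     below = s[-i:] if i > 0 else ""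
--     return int(above + str(digit) + below)
--
-- def digit_at(x, i):
--     return int(str(x)[-i - 1])
--
-- def widen_tail(a, b):
--     # replace as many trailing zeros of a by 9s as keeps the result <= b
--     i, p = 0, 1
--     if a:
--         while a % (10 * p) == 0 and a + 10 * p - 1 <= b:
--             p *= 10
--             i += 1
--     return i, a + p - 1
--
-- def best_upper(a, b, i):
--     if i == 0:
--         d = min(9, digit_at(b, 0))
--     else:
--         d = max(1, digit_at(b, i) - 1)
--     for c in (9, d):
--         r = replace_with(a, i, c)
--         if r != 0 and r <= b:
--             return r
--     return a
--
-- def segment(a, b):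
--     if a == b:
--         return str(a)
--     n = 0
--     while a // 10 ** (n + 1) != b // 10 ** (n + 1):
--         n += 1
--     da = a // 10 ** n % 10
--     db = b // 10 ** n % 10
--     if da == db:
--         cls = str(da)
--     elif (da, db) == (0, 9):
--         cls = r"\d"
--     else:
--         cls = f"[{da}-{db}]"
--     top = a // 10 ** (n + 1)
--     return (str(top) if top else "") + cls + r"\d" * n
--
-- def number_range_to_regex(a, b):
--     assert a <= b
--     assert a >= 0 and b >= 0
--     segments = []
--     while True:
--         if a == b:
--             segments.append(str(a))
--             break
--         i, lo = widen_tail(a, b)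
--         max_a = best_upper(lo, b, i)
--         if max_a == b:
--             segments.append(segment(a, b))
--             break
--         segments.append(segment(a, max_a))
--         a = max_a + 1
--     return "|".join(segments)
-- ===== Notes on version B (the rewrite author's own statement) =====
-- stated objective: alternative
-- what changed: B replaces A's generator-of-nines plus falsy-'or' combinators and in-place digit-shifting by arithmetic on powers of ten (a counting loop for the shared-prefix length, a power-of-ten widening loop, an explicit scan of the two candidate digits) and drives the segmentation iteratively with a segment list joined once, instead of A's tail recursion with nested joins; only the two digit-string helpers replace_with/digit_at are kept.
import Mathlib
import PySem

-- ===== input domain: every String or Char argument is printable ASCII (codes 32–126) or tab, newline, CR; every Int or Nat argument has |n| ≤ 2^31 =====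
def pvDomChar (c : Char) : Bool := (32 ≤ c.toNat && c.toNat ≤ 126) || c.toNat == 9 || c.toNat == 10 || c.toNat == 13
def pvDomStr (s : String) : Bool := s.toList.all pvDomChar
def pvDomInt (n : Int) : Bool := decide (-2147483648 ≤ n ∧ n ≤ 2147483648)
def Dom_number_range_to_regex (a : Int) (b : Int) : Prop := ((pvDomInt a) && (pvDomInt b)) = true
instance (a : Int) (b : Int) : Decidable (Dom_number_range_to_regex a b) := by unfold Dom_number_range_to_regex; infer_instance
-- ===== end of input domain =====

-- B replaces A's generator-plus-falsy-`or` machinery by arithmetic on powers of ten (a single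
-- counting loop for the common-prefix length, a power-of-ten widening loop, an explicit candidate
-- scan) and drives the segmentation by an iterative accumulator loop with one final join instead
-- of A's tail recursion with nested joins; only the two digit-string helpers are kept.
-- Equivalence is proved for the return value only (no argument is mutated).

-- ===== PORT A =====
-- replace_with(a, i, digit); int(...) of the rebuilt digit string never raises on reachable inputs, .getD 0 covers the unreachable none
def replace_with (a : Int) (i : Int) (digit : Int) : Int :=
  let s := PySem.Int.toStr a
  let above := PySem.Str.slice s none (some (-i - 1))
  let below := if i > 0 then PySem.Str.slice s (some (-i)) none else ""
  (PySem.Int.ofStr? (above ++ PySem.Int.toStr digit ++ below)).getD 0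

-- digit_at(x, i); pyGet? none = IndexError, unreachable on admitted inputs
def digit_at (x : Int) (i : Int) : Int :=
  match PySem.Str.pyGet? (PySem.Int.toStr x) (-i - 1) with
  | some c => (PySem.Int.ofStr? (String.ofList [c])).getD 0
  | none => 0

def try_replace_ (a : Int) (b : Int) (index : Int) (digit : Int) : Option Int :=
  let replaced := replace_with a index digit
  if replaced ≤ b then some replaced else none

-- Python 'x or y' where x : Optional[int] (None and 0 are falsy)
def orFalsy (o : Option Int) (y : Option Int) : Option Int :=
  match o with
  | some v => if v = 0 then y else some v
  | none => y

-- '... or a' with a : int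
def orFalsyD (o : Option Int) (d : Int) : Int :=
  match o with
  | some v => if v = 0 then d else v
  | none => d

def try_to_replace_lowest_nonzero_digit (a : Int) (b : Int) (index : Int) : Int :=
  let digit := if index = 0 then min 9 (digit_at b 0) else max 1 (digit_at b index - 1)
  orFalsyD (orFalsy (try_replace_ a b index 9) (try_replace_ a b index digit)) a

-- the generator sequence_of_nines_instead_of_zeros fused with its only consumer's for-loop;
-- fuel only makes the while loop total (digits of a bound the iterations; never exhausted on Dom)
def razLoop : Nat → Int → Int → Int → Int → Int → Int × Int
  | 0, _, _, _, i, cur => (i, cur)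
  | Nat.succ f, ga, nine, b, i, cur =>
    if PySem.Int.mod ga 10 = 0 then
      let replaced := cur + nine
      if replaced ≤ b then
        razLoop f (PySem.Int.floordiv ga 10) (nine * 10) b (i + 1) replaced
      else (i, cur)
    else (i, cur)

def replace_all_zero_digits_staying_smaller_than_b (a : Int) (b : Int) : Int × Int :=
  if a = 0 then (0, a) else razLoop 40 a 9 b 0 a

def max_single_range_below (a : Int) (b : Int) : Int :=
  let p := replace_all_zero_digits_staying_smaller_than_b a b
  try_to_replace_lowest_nonzero_digit p.2 b p.1

-- the while a//10 != b//10 loop of single_range_to_regex (fuel = digit bound, never exhausted on Dom)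
def srLoop : Nat → Int → Int → String → Int × Int × String
  | 0, a, b, below => (a, b, below)
  | Nat.succ f, a, b, below =>
    if PySem.Int.floordiv a 10 ≠ PySem.Int.floordiv b 10 then
      srLoop f (PySem.Int.floordiv a 10) (PySem.Int.floordiv b 10) (below ++ "\\d")
    else (a, b, below)

def single_range_to_regex (a : Int) (b : Int) : String :=
  if a = b then PySem.Int.toStr a
  else
    let t := srLoop 40 a b ""
    let a' := t.1
    let b' := t.2.1
    let below := t.2.2
    let digit_a := PySem.Int.mod a' 10
    let digit_b := PySem.Int.mod b' 10
    let character_class :=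
      if digit_a = digit_b then PySem.Int.toStr digit_a
      else if digit_a = 0 ∧ digit_b = 9 then "\\d"
      else "[" ++ PySem.Int.toStr digit_a ++ "-" ++ PySem.Int.toStr digit_b ++ "]"
    let above := if PySem.Int.floordiv a' 10 ≠ 0 then PySem.Int.toStr (PySem.Int.floordiv a' 10) else ""
    above ++ character_class ++ below

-- A's recursion; fuel (b-a)+1 is exactly the recursion depth bound on inputs where A returns
def nrrGo : Nat → Int → Int → String
  | 0, _, _ => ""
  | Nat.succ f, a, b =>
    if a = b then PySem.Int.toStr a
    else
      let max_a := max_single_range_below a b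
      if max_a = b then single_range_to_regex a b
      else PySem.Str.join "|" [single_range_to_regex a max_a, nrrGo f (max_a + 1) b]

def number_range_to_regex (a : Int) (b : Int) : String :=
  nrrGo ((b - a).toNat + 1) a b

-- ===== PORT B =====
-- widen_tail's while loop over (i, p): fuel only totalises it (p grows tenfold each step)
def wtLoop : Nat → Int → Int → Int → Int → Int × Int
  | 0, _, _, i, p => (i, p)
  | Nat.succ f, a, b, i, p =>
    if PySem.Int.mod a (10 * p) = 0 ∧ a + 10 * p - 1 ≤ b then
      wtLoop f a b (i + 1) (p * 10)
    else (i, p)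

def widen_tail (a : Int) (b : Int) : Int × Int :=
  let ip := if a ≠ 0 then wtLoop 40 a b 0 1 else (0, 1)
  (ip.1, a + ip.2 - 1)

-- best_upper's for-loop over the candidate tuple (9, d)
def buLoop (a : Int) (b : Int) (i : Int) : List Int → Int
  | [] => a
  | c :: cs =>
    let r := replace_with a i c
    if r ≠ 0 ∧ r ≤ b then r else buLoop a b i cs

def best_upper (a : Int) (b : Int) (i : Int) : Int :=
  let d := if i = 0 then min 9 (digit_at b 0) else max 1 (digit_at b i - 1)
  buLoop a b i [9, d]

-- segmentB's counting loop 'while a // 10**(n+1) != b // 10**(n+1): n += 1' (fuel only totalises it)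
def cntLoop : Nat → Int → Int → Nat → Nat
  | 0, _, _, n => n
  | Nat.succ f, a, b, n =>
    if PySem.Int.floordiv a (10 ^ (n + 1)) ≠ PySem.Int.floordiv b (10 ^ (n + 1)) then
      cntLoop f a b (n + 1)
    else n

-- Python's '"\\d" * n' (string repetition), ported by hand: exact for n ≥ 0
def pyStrMul (s : String) : Nat → String
  | 0 => ""
  | Nat.succ n => s ++ pyStrMul s n

def segmentB (a : Int) (b : Int) : String :=
  if a = b then PySem.Int.toStr a
  else
    let n := cntLoop 40 a b 0
    let da := PySem.Int.mod (PySem.Int.floordiv a (10 ^ n)) 10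
    let db := PySem.Int.mod (PySem.Int.floordiv b (10 ^ n)) 10
    let cls :=
      if da = db then PySem.Int.toStr da
      else if da = 0 ∧ db = 9 then "\\d"
      else "[" ++ PySem.Int.toStr da ++ "-" ++ PySem.Int.toStr db ++ "]"
    let top := PySem.Int.floordiv a (10 ^ (n + 1))
    (if top ≠ 0 then PySem.Int.toStr top else "") ++ cls ++ pyStrMul "\\d" n

-- the while-True accumulator loop; same fuel bound as A's recursion, the fuel-0 default [""]
-- mirrors A's fuel-0 default "" and is unreachable on inputs where the Pythons return
def nrrLoop : Nat → Int → Int → List String → List String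
  | 0, _, _, segs => segs ++ [""]
  | Nat.succ f, a, b, segs =>
    if a = b then segs ++ [PySem.Int.toStr a]
    else
      let ip := widen_tail a b
      let max_a := best_upper ip.2 b ip.1
      if max_a = b then segs ++ [segmentB a b]
      else nrrLoop f (max_a + 1) b (segs ++ [segmentB a max_a])

def number_range_to_regex_alt (a : Int) (b : Int) : String :=
  PySem.Str.join "|" (nrrLoop ((b - a).toNat + 1) a b [])

-- ===== PRECONDITION & SPEC =====
-- Pre_ excludes exactly the inputs where the Python A raises: a < 0 or a > b (AssertionError), and
-- the digit pattern b = d·10^k + (10^k − 1) with 2 ≤ d mod 10 ≤ 8, k ≥ 1, a ≤ b − 10^k + 1, on which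
-- A's recursion never terminates (RecursionError); A returns on every other input.
def Pre_number_range_to_regex (a : Int) (b : Int) : Prop :=
  0 ≤ a ∧ a ≤ b ∧
    ∀ k ∈ Finset.Icc 1 10, ¬((b + 1) % (10 : Int) ^ k = 0 ∧
      2 ≤ (b / (10 : Int) ^ k) % 10 ∧ (b / (10 : Int) ^ k) % 10 ≤ 8 ∧ a ≤ b - (10 : Int) ^ k + 1)
instance (a : Int) (b : Int) : Decidable (Pre_number_range_to_regex a b) := by
  unfold Pre_number_range_to_regex; infer_instance

def pvWitness_number_range_to_regex : Int × Int := (5, 17)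

def Spec_number_range_to_regex (a : Int) (b : Int) (out : String) : Prop := out = number_range_to_regex_alt a b
instance (a : Int) (b : Int) (out : String) : Decidable (Spec_number_range_to_regex a b out) := by unfold Spec_number_range_to_regex; infer_instance

-- ===== CLAIM (what is proved, stated in full; the proofs are below) =====
def Claim_equal_number_range_to_regex : Prop := ∀ (a : Int) (b : Int), Dom_number_range_to_regex a b → Pre_number_range_to_regex a b → Spec_number_range_to_regex a b (number_range_to_regex a b)

-- ===== LEMMAS AND PROOFS =====

lemma strToList_inj {s t : String} (h : s.toList = t.toList) : s = t := by
  exact String.toList_inj.mp h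

lemma joinStr_singleton (s : String) : PySem.Str.join "|" [s] = s := by
  apply strToList_inj
  simp [PySem.Str.toList_join, PySem.Chars.join_singleton]

lemma joinStr_cons_of_ne_nil (s : String) (rest : List String) (h : rest ≠ []) :
    PySem.Str.join "|" (s :: rest) = s ++ "|" ++ PySem.Str.join "|" rest := by
  obtain ⟨q, t, rfl⟩ := List.exists_cons_of_ne_nil h
  apply strToList_inj
  simp [PySem.Str.toList_join, PySem.Chars.join_cons_cons]

-- the candidate chain: A's falsy 'or' combinators = B's scan of [9, d]
lemma try_eq_best (a b i : Int) :
    try_to_replace_lowest_nonzero_digit a b i = best_upper a b i := by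
  unfold try_to_replace_lowest_nonzero_digit best_upper try_replace_
  dsimp only
  set d := if i = 0 then min 9 (digit_at b 0) else max 1 (digit_at b i - 1) with hd
  by_cases h9b : replace_with a i 9 ≤ b <;> by_cases h90 : replace_with a i 9 = 0 <;>
    by_cases hdb : replace_with a i d ≤ b <;> by_cases hd0 : replace_with a i d = 0 <;>
      simp [buLoop, orFalsy, orFalsyD, h9b, h90, hdb, hd0]
  all_goals split_ifs <;> simp_all

-- floordiv by consecutive powers of ten composes
lemma fd_fd (x : Int) (m : Nat) :
    PySem.Int.floordiv (PySem.Int.floordiv x (10 ^ m)) 10 = PySem.Int.floordiv x (10 ^ (m + 1)) := by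
  rw [PySem.Int.floordiv_eq_ediv_of_pos (show (0:Int) < 10 by norm_num),
      PySem.Int.floordiv_eq_ediv_of_pos (show (0:Int) < 10 ^ m by positivity),
      PySem.Int.floordiv_eq_ediv_of_pos (show (0:Int) < 10 ^ (m + 1) by positivity),
      Int.ediv_ediv_of_nonneg (by positivity), pow_succ]

lemma fd_one (x : Int) : PySem.Int.floordiv x 1 = x := by
  rw [PySem.Int.floordiv_eq_ediv_of_pos (by norm_num), Int.ediv_one]

-- trailing-zero widening: A's generator state (ga, nine, cur) vs B's (i, p) with p = 10^k
lemma raz_eq_wt (b : Int) : ∀ (f : Nat) (c j : Int) (k : Nat),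
    razLoop f c (9 * 10 ^ k) b j (10 ^ k * c + 10 ^ k - 1)
      = ((wtLoop f (10 ^ k * c) b j (10 ^ k)).1,
         10 ^ k * c + (wtLoop f (10 ^ k * c) b j (10 ^ k)).2 - 1) := by
  intro f
  induction f with
  | zero => intro c j k; simp [razLoop, wtLoop]
  | succ f ih =>
    intro c j k
    have hmodA : (PySem.Int.mod c 10 = 0) ↔ (10:Int) ∣ c := PySem.Int.mod_eq_zero_iff_dvd c 10
    have hmodB : (PySem.Int.mod (10 ^ k * c) (10 * 10 ^ k) = 0) ↔ (10:Int) ∣ c := by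
      rw [PySem.Int.mod_eq_zero_iff_dvd, mul_comm (10:Int) (10 ^ k)]
      exact mul_dvd_mul_iff_left (by positivity)
    simp only [razLoop, wtLoop]
    by_cases hdiv : (10:Int) ∣ c
    · obtain ⟨d, rfl⟩ := hdiv
      have hcd : PySem.Int.floordiv (10 * d) 10 = d := by
        rw [PySem.Int.floordiv_eq_ediv_of_pos (by norm_num)]
        exact Int.mul_ediv_cancel_left d (by norm_num)
      by_cases hle : 10 ^ k * (10 * d) + 10 ^ k - 1 + 9 * 10 ^ k ≤ b
      · rw [if_pos (hmodA.mpr ⟨d, rfl⟩), if_pos hle,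
           if_pos (⟨hmodB.mpr ⟨d, rfl⟩, by linarith⟩ : _ ∧ _), hcd]
        have e1 : 10 ^ k * (10 * d) + 10 ^ k - 1 + 9 * 10 ^ k = 10 ^ (k+1) * d + 10 ^ (k+1) - 1 := by
          ring
        have e2 : (9 : Int) * 10 ^ k * 10 = 9 * 10 ^ (k+1) := by ring
        have e3 : (10 : Int) ^ k * (10 * d) = 10 ^ (k+1) * d := by ring
        have e4 : (10 : Int) ^ k * 10 = 10 ^ (k+1) := by ring
        rw [e1, e2, e3, e4]
        exact ih d (j + 1) (k + 1)
      · rw [if_pos (hmodA.mpr ⟨d, rfl⟩), if_neg hle,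
           if_neg (fun h => hle (by linarith [h.2]))]
    · rw [if_neg (fun h => hdiv (hmodA.mp h)),
         if_neg (fun h => hdiv (hmodB.mp h.1))]

lemma widen_eq (a b : Int) :
    replace_all_zero_digits_staying_smaller_than_b a b = widen_tail a b := by
  unfold replace_all_zero_digits_staying_smaller_than_b widen_tail
  by_cases ha : a = 0
  · subst ha; simp
  · rw [if_neg ha]
    simpa [ha] using raz_eq_wt b 40 a 0 0

lemma max_single_eq (a b : Int) :
    max_single_range_below a b = best_upper (widen_tail a b).2 b (widen_tail a b).1 := by
  rw [max_single_range_below, widen_eq, try_eq_best]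

lemma cnt_ge : ∀ (f : Nat) (a b : Int) (n : Nat), n ≤ cntLoop f a b n := by
  intro f
  induction f with
  | zero => intro a b n; simp [cntLoop]
  | succ f ih =>
    intro a b n
    simp only [cntLoop]
    split
    · exact le_trans (Nat.le_succ n) (ih a b (n + 1))
    · exact le_refl n

-- the prefix-stripping loop: A shifts (a, b) in place, B counts the shift
lemma sr_eq_cnt (a b : Int) : ∀ (f : Nat) (n : Nat) (below : String),
    srLoop f (PySem.Int.floordiv a (10 ^ n)) (PySem.Int.floordiv b (10 ^ n)) below
      = (PySem.Int.floordiv a (10 ^ cntLoop f a b n),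
         PySem.Int.floordiv b (10 ^ cntLoop f a b n),
         below ++ pyStrMul "\\d" (cntLoop f a b n - n)) := by
  intro f
  induction f with
  | zero => intro n below; simp [srLoop, cntLoop, pyStrMul]
  | succ f ih =>
    intro n below
    simp only [srLoop, cntLoop, fd_fd]
    by_cases h : PySem.Int.floordiv a (10 ^ (n + 1)) ≠ PySem.Int.floordiv b (10 ^ (n + 1))
    · rw [if_pos h, if_pos h, ih (n + 1) (below ++ "\\d")]
      have hge := cnt_ge f a b (n + 1)
      have hsub : cntLoop f a b (n + 1) - n = (cntLoop f a b (n + 1) - (n + 1)) + 1 := by omega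
      rw [hsub]
      simp only [pyStrMul, String.append_assoc]
    · rw [if_neg h, if_neg h]
      simp [pyStrMul]

lemma segment_eq (a b : Int) : single_range_to_regex a b = segmentB a b := by
  unfold single_range_to_regex segmentB
  by_cases hab : a = b
  · simp [hab]
  · rw [if_neg hab, if_neg hab]
    have h0 : ∀ (x : Int), x = PySem.Int.floordiv x (10 ^ (0:Nat)) := by
      intro x; rw [pow_zero, fd_one]
    have hsr : srLoop 40 a b ""
        = (PySem.Int.floordiv a (10 ^ cntLoop 40 a b 0),
           PySem.Int.floordiv b (10 ^ cntLoop 40 a b 0),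
           "" ++ pyStrMul "\\d" (cntLoop 40 a b 0 - 0)) := by
      conv_lhs => rw [h0 a, h0 b]
      exact sr_eq_cnt a b 40 0 ""
    rw [hsr]
    simp only [Nat.sub_zero, String.empty_append, fd_fd]

lemma nrrLoop_append (f : Nat) : ∀ (a b : Int) (segs : List String),
    nrrLoop f a b segs = segs ++ nrrLoop f a b [] := by
  induction f with
  | zero => intro a b segs; simp [nrrLoop]
  | succ f ih =>
    intro a b segs
    by_cases h1 : a = b
    · simp [nrrLoop, h1]
    · by_cases h2 : best_upper (widen_tail a b).2 b (widen_tail a b).1 = b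
      · simp [nrrLoop, h1, h2]
      · simp only [nrrLoop, h1, h2, if_false]
        rw [ih _ b (segs ++ [segmentB a _]), ih _ b ([] ++ [segmentB a _])]
        simp

lemma nrrLoop_ne_nil (f : Nat) (a b : Int) : nrrLoop f a b [] ≠ [] := by
  cases f with
  | zero => simp [nrrLoop]
  | succ f =>
    by_cases h1 : a = b
    · simp [nrrLoop, h1]
    · by_cases h2 : best_upper (widen_tail a b).2 b (widen_tail a b).1 = b
      · simp [nrrLoop, h1, h2]
      · simp only [nrrLoop, h1, h2, if_false]
        rw [nrrLoop_append]
        simp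

lemma go_eq_loop (f : Nat) : ∀ (a b : Int),
    PySem.Str.join "|" (nrrLoop f a b []) = nrrGo f a b := by
  induction f with
  | zero =>
    intro a b
    show PySem.Str.join "|" [""] = ""
    rw [joinStr_singleton]
  | succ f ih =>
    intro a b
    by_cases h1 : a = b
    · simp [nrrLoop, nrrGo, h1, joinStr_singleton]
    · by_cases h2 : best_upper (widen_tail a b).2 b (widen_tail a b).1 = b
      · simp only [nrrLoop, nrrGo, h1, h2, if_false, max_single_eq, if_pos,
          List.nil_append, joinStr_singleton, segment_eq]
      · simp only [nrrLoop, nrrGo, h1, if_false, max_single_eq, h2,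
          List.nil_append]
        rw [nrrLoop_append, List.singleton_append,
            joinStr_cons_of_ne_nil _ _ (nrrLoop_ne_nil f _ b),
            ih _ b,
            joinStr_cons_of_ne_nil _ _ (by simp), joinStr_singleton, segment_eq]

-- ===== VERDICT (by name: the statement is the Claim_ definition above) =====
theorem number_range_to_regex_spec : Claim_equal_number_range_to_regex := by
  intro a b _ _
  unfold Spec_number_range_to_regex number_range_to_regex number_range_to_regex_alt
  rw [go_eq_loop]
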